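-- pv_equiv track=rewrite | github.com/dhanush005-rass/ZohoSP | Pyhton/Problems/Subwob.py | subwoop
-- ===== SOURCE A (Python) =====
-- def subwoop(a, b):
--     MASK = 0xFFFFFFFF
--     MAX_INT = 0x7FFFFFFF
--
--     while b != 0:
--         borrow = ((~a & b) << 1) & MASK
--         a = (a ^ b) & MASK
--         b = borrow
--
--     # convert back to signed int
--     return a if a <= MAX_INT else ~(a ^ MASK)
-- ===== SOURCE B (Python) =====
-- def subwoop(a, b):
--     # 32-bit signed subtraction, closed form: reduce the difference mod 2**32,
--     # then map the bit pattern back to a signed integer.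
--     diff = (a - b) % (1 << 32)
--     return diff - (1 << 32) if diff > 0x7FFFFFFF else diff
-- ===== Notes on version B (the rewrite author's own statement) =====
-- stated objective: simpler
-- what changed: Replaces the XOR/borrow bit-propagation while-loop (up to ~33 iterations of bitwise stepping) by one closed-form modular subtraction (a - b) % 2**32 plus a direct signed conversion; on the |int| <= 2^31 domain this matches A exactly, including b == 0.
import Mathlib
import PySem

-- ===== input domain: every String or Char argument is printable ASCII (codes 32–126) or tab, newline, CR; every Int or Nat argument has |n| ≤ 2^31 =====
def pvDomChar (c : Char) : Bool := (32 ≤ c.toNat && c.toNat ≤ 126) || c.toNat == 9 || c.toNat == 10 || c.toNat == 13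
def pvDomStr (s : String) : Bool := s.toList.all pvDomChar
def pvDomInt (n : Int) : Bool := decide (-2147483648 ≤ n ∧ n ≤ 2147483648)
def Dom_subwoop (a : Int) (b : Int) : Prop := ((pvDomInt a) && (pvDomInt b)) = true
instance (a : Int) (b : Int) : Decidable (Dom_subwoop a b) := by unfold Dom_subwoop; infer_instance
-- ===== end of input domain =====

-- B replaces A's 32-bit borrow-propagation while-loop by the closed form (a - b) mod 2^32 plus a
-- direct signed conversion; on the |int| ≤ 2^31 domain the two agree everywhere.

-- ===== PORT A =====
-- the `while b != 0` loop; `fuel` only makes the recursion total (the loop always ends within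
-- 33 iterations, proved below); `~a` is ported exactly as -a - 1 and `x << 1` exactly as x * 2.
def subwoopLoop : Nat → Int → Int → Int
  | 0, a, _ => a
  | fuel + 1, a, b =>
    if b ≠ 0 then
      -- borrow = ((~a & b) << 1) & MASK ; a = (a ^ b) & MASK ; b = borrow
      subwoopLoop fuel (PySem.Int.band (PySem.Int.bxor a b) 4294967295)
        (PySem.Int.band (PySem.Int.band (-a - 1) b * 2) 4294967295)
    else a

def subwoop (a : Int) (b : Int) : Int :=
  let r := subwoopLoop 40 a b
  -- return a if a <= MAX_INT else ~(a ^ MASK)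
  if r ≤ 2147483647 then r else -(PySem.Int.bxor r 4294967295) - 1

-- ===== PORT B =====
def subwoop_alt (a : Int) (b : Int) : Int :=
  let diff := PySem.Int.mod (a - b) 4294967296   -- (a - b) % (1 << 32)
  if diff > 2147483647 then diff - 4294967296 else diff

-- ===== PRECONDITION & SPEC =====
def Spec_subwoop (a : Int) (b : Int) (out : Int) : Prop := out = subwoop_alt a b
instance (a : Int) (b : Int) (out : Int) : Decidable (Spec_subwoop a b out) := by unfold Spec_subwoop; infer_instance

-- ===== CLAIM (what is proved, stated in full; the proofs are below) =====
def Claim_equal_subwoop : Prop := ∀ (a : Int) (b : Int), Dom_subwoop a b → Spec_subwoop a b (subwoop a b)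

-- ===== LEMMAS AND PROOFS =====

-- parity of p &&& q
lemma pv_and_mod_two (p q : Nat) : (p &&& q) % 2 = p % 2 * (q % 2) := by
  have h := Nat.testBit_and p q 0
  simp only [Nat.testBit_zero, ← Bool.decide_and, decide_eq_decide] at h
  rcases Nat.mod_two_eq_zero_or_one p with hp | hp <;>
    rcases Nat.mod_two_eq_zero_or_one q with hq | hq <;>
    rw [hp, hq] at h ⊢ <;> omega

-- parity of p ||| q
lemma pv_or_mod_two (p q : Nat) : (p ||| q) % 2 = p % 2 + q % 2 - p % 2 * (q % 2) := by
  have h := Nat.testBit_or p q 0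
  simp only [Nat.testBit_zero, ← Bool.decide_or, decide_eq_decide] at h
  rcases Nat.mod_two_eq_zero_or_one p with hp | hp <;>
    rcases Nat.mod_two_eq_zero_or_one q with hq | hq <;>
    rw [hp, hq] at h ⊢ <;> omega

-- the ripple identity: addition = xor plus shifted carry
lemma pv_add_eq_xor (p : Nat) : ∀ q : Nat, p + q = (p ^^^ q) + 2 * (p &&& q) := by
  induction p using Nat.strong_induction_on with
  | _ p ih =>
    intro q
    rcases Nat.eq_zero_or_pos p with hp | hp
    · simp [hp]
    · have hlt : p / 2 < p := Nat.div_lt_self hp (by norm_num)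
      have h1 := ih (p / 2) hlt (q / 2)
      have hx : (p ^^^ q) = 2 * (p / 2 ^^^ q / 2) + (p ^^^ q) % 2 := by
        conv_lhs => rw [← Nat.div_add_mod (p ^^^ q) 2]
        rw [Nat.xor_div_two]
      have ha : (p &&& q) = 2 * (p / 2 &&& q / 2) + (p &&& q) % 2 := by
        conv_lhs => rw [← Nat.div_add_mod (p &&& q) 2]
        rw [Nat.and_div_two]
      have hxm : (p ^^^ q) % 2 = (p + q) % 2 := Nat.xor_mod_two_eq
      have ham := pv_and_mod_two p q
      rcases Nat.mod_two_eq_zero_or_one p with hp2 | hp2 <;>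
        rcases Nat.mod_two_eq_zero_or_one q with hq2 | hq2 <;>
        rw [hp2, hq2] at ham <;> omega

-- or = xor plus and
lemma pv_or_eq_xor_add_and (p : Nat) : ∀ q : Nat, p ||| q = (p ^^^ q) + (p &&& q) := by
  induction p using Nat.strong_induction_on with
  | _ p ih =>
    intro q
    rcases Nat.eq_zero_or_pos p with hp | hp
    · simp [hp]
    · have hlt : p / 2 < p := Nat.div_lt_self hp (by norm_num)
      have h1 := ih (p / 2) hlt (q / 2)
      have ho : (p ||| q) = 2 * (p / 2 ||| q / 2) + (p ||| q) % 2 := by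
        conv_lhs => rw [← Nat.div_add_mod (p ||| q) 2]
        rw [Nat.or_div_two]
      have hx : (p ^^^ q) = 2 * (p / 2 ^^^ q / 2) + (p ^^^ q) % 2 := by
        conv_lhs => rw [← Nat.div_add_mod (p ^^^ q) 2]
        rw [Nat.xor_div_two]
      have ha : (p &&& q) = 2 * (p / 2 &&& q / 2) + (p &&& q) % 2 := by
        conv_lhs => rw [← Nat.div_add_mod (p &&& q) 2]
        rw [Nat.and_div_two]
      have hxm : (p ^^^ q) % 2 = (p + q) % 2 := Nat.xor_mod_two_eq
      have ham := pv_and_mod_two p q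
      have hom := pv_or_mod_two p q
      rcases Nat.mod_two_eq_zero_or_one p with hp2 | hp2 <;>
        rcases Nat.mod_two_eq_zero_or_one q with hq2 | hq2 <;>
        rw [hp2, hq2] at ham hom <;> omega

-- masking with 0xFFFFFFFF is reduction mod 2^32, for EVERY Python int
lemma pv_band_mask (x : Int) : PySem.Int.band x 4294967295 = x % 4294967296 := by
  unfold PySem.Int.band
  split_ifs with h1 h2 h2 <;> try omega
  · have hm : x.toNat &&& (4294967295 : Int).toNat = x.toNat % 2 ^ 32 := by
      have := Nat.and_two_pow_sub_one_eq_mod x.toNat 32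
      norm_num at this ⊢
      exact this
    rw [hm]
    omega
  · have hm : (4294967295 : Int).toNat &&& (-x - 1).toNat = (-x - 1).toNat % 2 ^ 32 := by
      have := Nat.and_two_pow_sub_one_eq_mod (-x - 1).toNat 32
      rw [Nat.and_comm] at this
      norm_num at this ⊢
      exact this
    rw [hm]
    omega

-- the borrow-step identity: (a ^ b) - 2*(~a & b) = a - b, over all of ℤ
lemma pv_key (a b : Int) : PySem.Int.bxor a b - 2 * PySem.Int.band (-a - 1) b = a - b := by
  unfold PySem.Int.bxor PySem.Int.band
  by_cases ha : 0 ≤ a <;> by_cases hb : 0 ≤ b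
  · have hna : ¬ (0 ≤ -a - 1) := by omega
    simp only [ha, hb, hna, if_true, if_false]
    have e : (-(-a - 1) - 1).toNat = a.toNat := by omega
    rw [e]
    have h1 := pv_add_eq_xor b.toNat a.toNat
    have h2 : b.toNat &&& a.toNat ≤ b.toNat := Nat.and_le_left
    have h3 : b.toNat ^^^ a.toNat = a.toNat ^^^ b.toNat := Nat.xor_comm ..
    omega
  · have hna : ¬ (0 ≤ -a - 1) := by omega
    simp only [ha, hb, hna, if_true, if_false]
    have e : (-(-a - 1) - 1).toNat = a.toNat := by omega
    rw [e]
    have h1 := pv_add_eq_xor a.toNat (-b - 1).toNat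
    have h2 := pv_or_eq_xor_add_and a.toNat (-b - 1).toNat
    omega
  · have hpa : 0 ≤ -a - 1 := by omega
    simp only [ha, hb, hpa, if_true, if_false]
    have h1 := pv_add_eq_xor (-a - 1).toNat b.toNat
    have h2 : (-a - 1).toNat &&& b.toNat ≤ (-a - 1).toNat := Nat.and_le_left
    have h3 : (-a - 1).toNat &&& b.toNat ≤ b.toNat := Nat.and_le_right
    have h4 : (-a - 1).toNat ^^^ b.toNat = b.toNat ^^^ (-a - 1).toNat := Nat.xor_comm ..
    omega
  · have hpa : 0 ≤ -a - 1 := by omega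
    simp only [ha, hb, hpa, if_true, if_false]
    have h1 := pv_add_eq_xor (-a - 1).toNat (-b - 1).toNat
    have h2 : (-a - 1).toNat &&& (-b - 1).toNat ≤ (-a - 1).toNat := Nat.and_le_left
    omega

-- a power of two dividing q divides q &&& m as well (the low bits of q are zero)
lemma pv_nat_dvd_and (k q m : Nat) (h : 2 ^ k ∣ q) : 2 ^ k ∣ q &&& m := by
  apply Nat.dvd_of_mod_eq_zero
  have hq : q &&& (2 ^ k - 1) = 0 := by
    rw [Nat.and_two_pow_sub_one_eq_mod]
    omega
  rw [← Nat.and_two_pow_sub_one_eq_mod]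
  calc q &&& m &&& (2 ^ k - 1) = q &&& (2 ^ k - 1) &&& m := by
        rw [Nat.and_assoc, Nat.and_assoc, Nat.and_comm m]
    _ = 0 := by rw [hq, Nat.zero_and]

-- a power of two dividing a nonnegative b divides band x b
lemma pv_dvd_band (k : Nat) (x b : Int) (hb : 0 ≤ b) (h : (2 ^ k : Int) ∣ b) :
    (2 ^ k : Int) ∣ PySem.Int.band x b := by
  have hbn : (2 ^ k : Nat) ∣ b.toNat := by
    rw [← Int.natCast_dvd_natCast]
    push_cast
    rwa [Int.toNat_of_nonneg hb]
  unfold PySem.Int.band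
  by_cases hx : 0 ≤ x
  · simp only [hx, hb, if_true]
    have := pv_nat_dvd_and k b.toNat x.toNat hbn
    rw [Nat.and_comm] at this
    exact_mod_cast Int.natCast_dvd_natCast.mpr this
  · simp only [hx, hb, if_true, if_false]
    have h2 := pv_nat_dvd_and k b.toNat (-x - 1).toNat hbn
    have := Nat.dvd_sub hbn h2
    exact_mod_cast Int.natCast_dvd_natCast.mpr this

-- a common divisor of x and n divides x % n
lemma pv_dvd_emod (c x n : Int) (h1 : c ∣ x) (h2 : c ∣ n) : c ∣ x % n := by
  rw [Int.emod_def]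
  exact dvd_sub h1 (h2.mul_right _)

-- when b = 0 the loop stops immediately
lemma pv_loop_zero (f : Nat) (a : Int) : subwoopLoop f a 0 = a := by
  cases f <;> simp [subwoopLoop]

-- one iteration of the loop
lemma pv_loop_succ (f : Nat) (a b : Int) (hb : b ≠ 0) :
    subwoopLoop (f + 1) a b =
      subwoopLoop f (PySem.Int.band (PySem.Int.bxor a b) 4294967295)
        (PySem.Int.band (PySem.Int.band (-a - 1) b * 2) 4294967295) := by
  simp [subwoopLoop, hb]

-- main loop invariant: for 32-bit a, b with 2^(33-m) ∣ b and fuel ≥ m the loop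
-- computes (a - b) mod 2^32
lemma pv_loop (m : Nat) : ∀ (f : Nat) (a b : Int), m ≤ 33 → m ≤ f →
    0 ≤ a → a < 4294967296 → 0 ≤ b → b < 4294967296 → (2 ^ (33 - m) : Int) ∣ b →
    subwoopLoop f a b = (a - b) % 4294967296 := by
  induction m with
  | zero =>
    intro f a b _ _ ha1 ha2 hb1 hb2 hd
    norm_num at hd
    have hb0 : b = 0 := by omega
    subst hb0
    rw [pv_loop_zero]
    omega
  | succ m ih =>
    intro f a b hm33 hf ha1 ha2 hb1 hb2 hd
    obtain ⟨f', rfl⟩ : ∃ f', f = f' + 1 := ⟨f - 1, by omega⟩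
    by_cases hb0 : b = 0
    · subst hb0
      rw [pv_loop_zero]
      omega
    · rw [pv_loop_succ _ _ _ hb0, pv_band_mask, pv_band_mask]
      have h33 : 33 - (m + 1) = 32 - m := by omega
      rw [h33] at hd
      rcases Nat.eq_zero_or_pos m with hm0 | hm0
      · exfalso
        subst hm0
        norm_num at hd
        omega
      · have hxd : (2 ^ (32 - m) : Int) ∣ PySem.Int.band (-a - 1) b :=
          pv_dvd_band (32 - m) (-a - 1) b hb1 hd
        have hxd2 : (2 ^ (33 - m) : Int) ∣ PySem.Int.band (-a - 1) b * 2 := by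
          rcases hxd with ⟨c, hc⟩
          exact ⟨c, by rw [hc, show (33 - m) = (32 - m) + 1 from by omega, pow_succ]; ring⟩
        have hNd : (2 ^ (33 - m) : Int) ∣ 4294967296 := by
          have he : (4294967296 : Int) = 2 ^ (33 - m + (32 - (33 - m))) := by
            rw [show 33 - m + (32 - (33 - m)) = 32 from by omega]
            norm_num
          rw [he, pow_add]
          exact dvd_mul_right _ _
        have hbd' := pv_dvd_emod _ _ _ hxd2 hNd
        rw [ih f' _ _ (by omega) (by omega)
            (Int.emod_nonneg _ (by norm_num)) (Int.emod_lt_of_pos _ (by norm_num))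
            (Int.emod_nonneg _ (by norm_num)) (Int.emod_lt_of_pos _ (by norm_num)) hbd',
          ← Int.sub_emod]
        have hk := pv_key a b
        congr 1
        omega

-- signed conversion: for a 32-bit pattern above MAX_INT, ~(r ^ MASK) = r - 2^32
lemma pv_conv (r : Int) (h1 : 0 ≤ r) (h2 : r < 4294967296) :
    -(PySem.Int.bxor r 4294967295) - 1 = r - 4294967296 := by
  unfold PySem.Int.bxor
  simp only [h1, show (0 : Int) ≤ 4294967295 from by norm_num, if_true]
  have hadd := pv_add_eq_xor r.toNat (4294967295 : Int).toNat
  have hm : r.toNat &&& (4294967295 : Int).toNat = r.toNat % 2 ^ 32 := by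
    have := Nat.and_two_pow_sub_one_eq_mod r.toNat 32
    norm_num at this ⊢
    exact this
  rw [hm] at hadd
  have : r.toNat % 2 ^ 32 = r.toNat := Nat.mod_eq_of_lt (by omega)
  rw [this] at hadd
  omega

-- ===== VERDICT (by name: the statement is the Claim_ definition above) =====
theorem subwoop_spec : Claim_equal_subwoop := by
  intro a b hdom
  have hab : -2147483648 ≤ a ∧ a ≤ 2147483648 ∧ -2147483648 ≤ b ∧ b ≤ 2147483648 := by
    unfold Dom_subwoop pvDomInt at hdom
    simp at hdom
    omega
  unfold Spec_subwoop subwoop subwoop_alt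
  rw [PySem.Int.mod_eq_emod_of_pos (by norm_num)]
  by_cases hb : b = 0
  · subst hb
    simp only [pv_loop_zero, Int.sub_zero]
    by_cases hle : a ≤ 2147483647
    · rw [if_pos hle]
      by_cases ha0 : 0 ≤ a
      · rw [Int.emod_eq_of_lt ha0 (by omega), if_neg (by omega)]
      · have he : a % 4294967296 = a + 4294967296 := by omega
        rw [he, if_pos (by omega)]
        ring
    · rw [if_neg hle]
      have he : a % 4294967296 = a := Int.emod_eq_of_lt (by omega) (by omega)
      rw [he, if_pos (by omega), pv_conv a (by omega) (by omega)]
  · have hr : subwoopLoop 40 a b = (a - b) % 4294967296 := by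
      rw [show (40 : Nat) = 39 + 1 from rfl, pv_loop_succ _ _ _ hb, pv_band_mask, pv_band_mask]
      have hd2 : (2 ^ (33 - 32) : Int) ∣ (PySem.Int.band (-a - 1) b * 2) % 4294967296 := by
        apply pv_dvd_emod
        · norm_num
        · norm_num
      rw [pv_loop 32 39 _ _ (by omega) (by omega)
          (Int.emod_nonneg _ (by norm_num)) (Int.emod_lt_of_pos _ (by norm_num))
          (Int.emod_nonneg _ (by norm_num)) (Int.emod_lt_of_pos _ (by norm_num)) hd2,
        ← Int.sub_emod]
      have hk := pv_key a b
      congr 1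
      omega
    rw [hr]
    have hb1 : 0 ≤ (a - b) % 4294967296 := Int.emod_nonneg _ (by norm_num)
    have hb2 : (a - b) % 4294967296 < 4294967296 := Int.emod_lt_of_pos _ (by norm_num)
    by_cases hle : (a - b) % 4294967296 ≤ 2147483647
    · rw [if_pos hle, if_neg (by omega)]
    · rw [if_neg hle, if_pos (by omega), pv_conv _ (by omega) (by omega)]
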